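-- pv_equiv track=rewrite | github.com/evgeniyBolnov/qtt | scripts/mem_gen.py | ones_len
-- ===== SOURCE A (Python) =====
-- def ones_len(number: int):
-- 	length = 0
-- 	max_len = 0
-- 	max_end = 0
-- 	max_start = 0
-- 	for i in range(8):
-- 		if ( number >> i ) & 0x01:
-- 			length += 1
-- 			if length > max_len:
-- 				max_len = length
-- 		else:
-- 			length = 0;
-- 	for i in range(8):
-- 		if ( number >> ( 7 - i ) & 0x01):
-- 			max_end += 1
-- 		else:
-- 			break
-- 	for i in range(8):
-- 		if ( number >> i & 0x01):
-- 			max_start += 1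
-- 		else:
-- 			break
-- 	return max_len, max_end, max_start
-- ===== SOURCE B (Python) =====
-- def ones_len(number: int):
-- 	s = format(number % 256, '08b')
-- 	max_len = max(len(r) for r in s.split('0'))
-- 	max_end = len(s) - len(s.lstrip('1'))
-- 	max_start = len(s) - len(s.rstrip('1'))
-- 	return max_len, max_end, max_start
-- ===== Notes on version B (the rewrite author's own statement) =====
-- stated objective: idiomatic
-- what changed: Replaces A's three bit-shift loops (running max of a run counter plus two break-loops from MSB and LSB) with the binary-string representation of the low byte: longest one-run via splitting on the zero character, leading/trailing one-runs via lstrip/rstrip length differences.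
import Mathlib
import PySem

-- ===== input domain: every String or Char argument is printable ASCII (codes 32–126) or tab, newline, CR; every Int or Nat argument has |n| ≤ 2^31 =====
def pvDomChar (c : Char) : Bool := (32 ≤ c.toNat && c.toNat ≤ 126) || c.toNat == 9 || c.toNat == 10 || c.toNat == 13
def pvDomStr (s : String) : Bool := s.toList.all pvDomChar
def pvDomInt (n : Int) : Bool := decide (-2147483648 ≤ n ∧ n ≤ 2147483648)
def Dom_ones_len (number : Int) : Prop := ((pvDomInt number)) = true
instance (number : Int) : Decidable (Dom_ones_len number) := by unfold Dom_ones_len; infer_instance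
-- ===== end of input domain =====

-- B replaces A's three bit-shift loops by one 8-bit binary-string representation with split/lstrip/rstrip (objective: more idiomatic).

-- ===== PORT A =====
-- '( number >> i ) & 0x01' (Python >> is Lean's >>> on Int, & 1 is PySem.Int.band)
def pvBit (number : Int) (i : Nat) : Int := PySem.Int.band (number >>> i) 1

-- the first loop: state (length, max_len), over range(8)
def pvLoop1 (number : Int) : Int × Int :=
  (List.range 8).foldl
    (fun (st : Int × Int) i =>
      if pvBit number i ≠ 0 then
        let length := st.1 + 1
        (length, if length > st.2 then length else st.2)
      else (0, st.2))
    (0, 0)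

-- the second/third loops: count-until-break over range(8); 'sel i' is the shifted-by amount
def pvCountBreak (number : Int) (sel : Nat → Nat) : List Nat → Int
  | [] => 0
  | i :: rest => if pvBit number (sel i) ≠ 0 then 1 + pvCountBreak number sel rest else 0

def ones_len (number : Int) : Int × Int × Int :=
  let max_len := (pvLoop1 number).2
  let max_end := pvCountBreak number (fun i => 7 - i) (List.range 8)
  let max_start := pvCountBreak number (fun i => i) (List.range 8)
  (max_len, max_end, max_start)

-- ===== PORT B =====
-- format(v, '08b') for 0 ≤ v < 256: the 8 bits of v, MSB first (hand port of format, exact on that range)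
def pvBin8 (v : Int) : List Char :=
  (List.range 8).map (fun i => if PySem.Int.band (v >>> (7 - i)) 1 = 1 then '1' else '0')

def ones_len_alt (number : Int) : Int × Int × Int :=
  let s := pvBin8 (PySem.Int.mod number 256)
  let max_len := ((PySem.Chars.splitOn s ['0']).map List.length).foldl max 0
  -- s.lstrip('1') / s.rstrip('1') ported as dropWhile / rdropWhile (exact: strips that one char)
  let max_end := s.length - (s.dropWhile (· == '1')).length
  let max_start := s.length - (s.rdropWhile (· == '1')).length
  ((max_len : Int), (max_end : Int), (max_start : Int))

-- ===== PRECONDITION & SPEC =====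
def Spec_ones_len (number : Int) (out : Int × Int × Int) : Prop := out = ones_len_alt number
instance (number : Int) (out : Int × Int × Int) : Decidable (Spec_ones_len number out) := by unfold Spec_ones_len; infer_instance

-- ===== CLAIM (what is proved, stated in full; the proofs are below) =====
def Claim_equal_ones_len : Prop := ∀ (number : Int), Dom_ones_len number → Spec_ones_len number (ones_len number)

-- ===== LEMMAS AND PROOFS =====

-- bits 0..7 only depend on the residue mod 256
theorem pvBit_mod (n : Int) (i : Nat) (h : i < 8) :
    pvBit n i = pvBit (PySem.Int.mod n 256) i := by
  unfold pvBit
  rw [PySem.Int.band_one, PySem.Int.band_one,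
      PySem.Int.mod_eq_emod_of_pos (by norm_num : (0:Int) < 2),
      PySem.Int.mod_eq_emod_of_pos (by norm_num : (0:Int) < 2),
      PySem.Int.mod_eq_emod_of_pos (by norm_num : (0:Int) < 256),
      Int.shiftRight_eq_div_pow, Int.shiftRight_eq_div_pow]
  interval_cases i <;> push_cast <;> omega

-- the loop body of pvLoop1, on the already-extracted bit
def pvStep (st : Int × Int) (b : Int) : Int × Int :=
  if b ≠ 0 then (st.1 + 1, if st.1 + 1 > st.2 then st.1 + 1 else st.2) else (0, st.2)

theorem pvLoop1_eq_map (n : Int) :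
    pvLoop1 n = ((List.range 8).map (pvBit n)).foldl pvStep (0, 0) := by
  rw [List.foldl_map]; rfl

theorem pvCountBreak_congr (n m : Int) (sel : Nat → Nat) (l : List Nat)
    (h : ∀ i ∈ l, pvBit n (sel i) = pvBit m (sel i)) :
    pvCountBreak n sel l = pvCountBreak m sel l := by
  induction l with
  | nil => rfl
  | cons i rest ih =>
    simp only [pvCountBreak, h i (by simp)]
    rw [ih (fun j hj => h j (by simp [hj]))]

theorem ones_len_mod (n : Int) : ones_len n = ones_len (PySem.Int.mod n 256) := by
  have hb : ∀ i ∈ List.range 8, pvBit n i = pvBit (PySem.Int.mod n 256) i :=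
    fun i hi => pvBit_mod n i (List.mem_range.mp hi)
  unfold ones_len
  rw [pvLoop1_eq_map, pvLoop1_eq_map, List.map_congr_left hb,
      pvCountBreak_congr n (PySem.Int.mod n 256) (fun i => 7 - i) (List.range 8)
        (fun i hi => pvBit_mod n (7 - i) (by omega)),
      pvCountBreak_congr n (PySem.Int.mod n 256) (fun i => i) (List.range 8)
        (fun i hi => pvBit_mod n i (List.mem_range.mp hi))]

theorem ones_len_alt_mod (n : Int) : ones_len_alt n = ones_len_alt (PySem.Int.mod n 256) := by
  unfold ones_len_alt
  rw [PySem.Int.mod_eq_emod_of_pos (by norm_num : (0:Int) < 256),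
      PySem.Int.mod_eq_emod_of_pos (by norm_num : (0:Int) < 256),
      Int.emod_emod_of_dvd n (dvd_refl 256)]

set_option maxRecDepth 8000 in
set_option maxHeartbeats 2000000 in
theorem ones_len_small : ∀ m < 256, ones_len ((m : Nat) : Int) = ones_len_alt ((m : Nat) : Int) := by
  decide

theorem ones_len_eq_alt (n : Int) : ones_len n = ones_len_alt n := by
  rw [ones_len_mod n, ones_len_alt_mod n]
  have h0 : (0:Int) < 256 := by norm_num
  have hr : PySem.Int.mod n 256 = ((n % 256).toNat : Int) := by
    rw [PySem.Int.mod_eq_emod_of_pos h0]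
    exact (Int.toNat_of_nonneg (Int.emod_nonneg n (by norm_num))).symm
  rw [hr]
  exact ones_len_small (n % 256).toNat (by
    have := Int.emod_lt_of_pos n h0
    omega)

-- ===== VERDICT (by name: the statement is the Claim_ definition above) =====
theorem ones_len_spec : Claim_equal_ones_len := by
  intro n _
  unfold Spec_ones_len
  exact ones_len_eq_alt n
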